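-- pv_equiv track=rewrite | github.com/RafifReinhartAlAflah/Test | Pratikum Daspro Python/Pratikum 4/roundup.py | terkecil_kedua
-- ===== SOURCE A (Python) =====
-- def terkecil_kedua(a, x):
--     kecil1 = 1001
--     kecil2 = 1001
--     for i in a:
--         if i > x:
--             if i < kecil1:
--                 kecil2 = kecil1
--                 kecil1 = i
--             elif i < kecil2:
--                 kecil2 = i
--     return kecil2
-- ===== SOURCE B (Python) =====
-- def terkecil_kedua(a, x):
--     cands = sorted(i for i in a if x < i < 1001)
--     return cands[1] if len(cands) >= 2 else 1001
-- ===== Notes on version B (the rewrite author's own statement) =====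
-- stated objective: simpler
-- what changed: Replaces the single-pass tracking of two running minima with filter-to-the-qualifying-window, sort, and index the second element.
import Mathlib
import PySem

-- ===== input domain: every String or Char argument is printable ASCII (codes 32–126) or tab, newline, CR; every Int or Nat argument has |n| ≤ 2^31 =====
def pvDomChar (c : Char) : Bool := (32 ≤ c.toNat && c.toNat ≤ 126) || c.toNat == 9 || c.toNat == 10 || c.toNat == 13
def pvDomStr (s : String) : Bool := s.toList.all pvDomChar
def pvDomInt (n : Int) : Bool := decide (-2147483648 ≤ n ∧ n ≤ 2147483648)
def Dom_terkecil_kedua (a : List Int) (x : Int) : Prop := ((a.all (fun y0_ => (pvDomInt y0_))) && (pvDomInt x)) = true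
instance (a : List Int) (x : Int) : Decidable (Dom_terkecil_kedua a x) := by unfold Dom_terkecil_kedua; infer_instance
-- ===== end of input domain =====

-- B replaces A's single-pass two-running-minima tracking by filter-sort-index-second; objective: simpler.


-- ===== PORT A =====
def terkecil_kedua (a : List Int) (x : Int) : Int :=
  (a.foldl (fun s i =>
      if i > x then
        if i < s.1 then (i, s.1)
        else if i < s.2 then (s.1, i)
        else s
      else s) ((1001 : Int), (1001 : Int))).2

-- ===== PORT B =====
def terkecil_kedua_alt (a : List Int) (x : Int) : Int :=
  let cands := PySem.List.sorted (a.filter (fun i => decide (x < i) && decide (i < 1001))) (fun y => y) false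
  match PySem.List.pyGet? cands 1 with
  | some v => v
  | none => 1001

-- ===== PRECONDITION & SPEC =====
def Spec_terkecil_kedua (a : List Int) (x : Int) (out : Int) : Prop := out = terkecil_kedua_alt a x
instance (a : List Int) (x : Int) (out : Int) : Decidable (Spec_terkecil_kedua a x out) := by unfold Spec_terkecil_kedua; infer_instance

-- ===== CLAIM (what is proved, stated in full; the proofs are below) =====
def Claim_equal_terkecil_kedua : Prop := ∀ (a : List Int) (x : Int), Dom_terkecil_kedua a x → Spec_terkecil_kedua a x (terkecil_kedua a x)

-- ===== LEMMAS AND PROOFS =====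

-- A's loop step
def pvStep (x : Int) (s : Int × Int) (i : Int) : Int × Int :=
  if i > x then
    if i < s.1 then (i, s.1)
    else if i < s.2 then (s.1, i)
    else s
  else s

-- the first two elements of a sorted candidate list, padded with the sentinel 1001
def pvPair (c : List Int) : Int × Int := (c.getD 0 1001, c.getD 1 1001)

-- pvPair components never exceed 1001 when all elements are < 1001
theorem pvPair_le (c : List Int) (hc : ∀ y ∈ c, y < 1001) :
    (pvPair c).1 ≤ 1001 ∧ (pvPair c).2 ≤ 1001 := by
  constructor <;>
  · simp only [pvPair]
    match c with
    | [] => simp [List.getD]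
    | [b] => first
        | (simp [List.getD]; exact le_of_lt (hc b (by simp)))
        | simp [List.getD]
    | b :: d :: t => first
        | (simp [List.getD]; exact le_of_lt (hc b (by simp)))
        | (simp [List.getD]; exact le_of_lt (hc d (by simp)))

-- inserting an in-window element into a sorted candidate list updates exactly as A's step does
theorem pvStep_orderedInsert (x i : Int) (c : List Int)
    (hi : x < i) (hi2 : i < 1001) (hs : c.Pairwise (· ≤ ·)) :
    pvPair (c.orderedInsert (· ≤ ·) i) = pvStep x (pvPair c) i := by
  match c with
  | [] => simp [pvPair, pvStep, List.orderedInsert, List.getD, hi, hi2]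
  | [b] =>
    by_cases h : i ≤ b
    · rcases lt_or_eq_of_le h with h' | h'
      · simp [pvPair, pvStep, List.orderedInsert, List.getD, hi, h, h']
      · subst h'; simp [pvPair, pvStep, List.orderedInsert, List.getD, hi, hi2]
    · have hb : b < i := not_le.mp h
      simp [pvPair, pvStep, List.orderedInsert, List.getD, hi, h, hi2, hb.asymm]
  | b :: d :: t =>
    have hbd : b ≤ d := (List.pairwise_cons.mp hs).1 d (by simp)
    have hs' : (d :: t).Pairwise (· ≤ ·) := (List.pairwise_cons.mp hs).2
    by_cases h : i ≤ b
    · rcases lt_or_eq_of_le h with h' | h'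
      · simp [pvPair, pvStep, List.orderedInsert, List.getD, hi, h, h']
      · subst h'
        by_cases hd : i < d
        · simp [pvPair, pvStep, List.orderedInsert, List.getD, hi, hd]
        · have : d = i := le_antisymm (not_lt.mp hd) hbd
          subst this
          simp [pvPair, pvStep, List.orderedInsert, List.getD, hi]
    · have hb : b < i := not_le.mp h
      by_cases hd : i ≤ d
      · rcases lt_or_eq_of_le hd with h' | h'
        · simp [pvPair, pvStep, List.orderedInsert, List.getD, hi, h, hd, not_lt.mpr (le_of_lt hb), h']
        · subst h'
          simp [pvPair, pvStep, List.orderedInsert, List.getD, hi, h, not_lt.mpr (le_of_lt hb)]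
      · have hdlt : d < i := not_le.mp hd
        simp [pvPair, pvStep, List.orderedInsert, List.getD, hi, h, hd, not_lt.mpr (le_of_lt hb),
              hdlt.asymm]

-- sorted of the filtered list, abbreviation
def pvCands (a : List Int) (x : Int) : List Int :=
  PySem.List.sorted (a.filter (fun i => decide (x < i) && decide (i < 1001))) (fun y => y) false

theorem pvCands_pairwise (a : List Int) (x : Int) : (pvCands a x).Pairwise (· ≤ ·) := by
  simpa using PySem.List.sorted_pairwise (xs := a.filter (fun i => decide (x < i) && decide (i < 1001))) (key := fun y => y)

theorem pvCands_mem (a : List Int) (x : Int) : ∀ y ∈ pvCands a x, y < 1001 := by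
  intro y hy
  have := (PySem.List.mem_sorted (xs := a.filter (fun i => decide (x < i) && decide (i < 1001)))
    (key := fun y => y) (rev := false) (x := y)).mp hy
  simp [List.mem_filter] at this
  exact this.2.2

theorem pvCands_append_singleton (a : List Int) (x i : Int) (hi : x < i) (hi2 : i < 1001) :
    pvCands (a ++ [i]) x = (pvCands a x).orderedInsert (· ≤ ·) i := by
  apply PySem.List.sorted_id_eq_of_perm_of_pairwise
  · have h1 : ((pvCands a x).orderedInsert (· ≤ ·) i).Perm (i :: pvCands a x) :=
      List.perm_orderedInsert _ _ _
    have h2 : (pvCands a x).Perm (a.filter (fun i => decide (x < i) && decide (i < 1001))) :=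
      PySem.List.sorted_perm _ _ _
    have h3 : (a ++ [i]).filter (fun i => decide (x < i) && decide (i < 1001))
        = a.filter (fun i => decide (x < i) && decide (i < 1001)) ++ [i] := by
      simp [List.filter_append, hi, hi2]
    rw [h3]
    exact (h1.trans (h2.cons i)).trans (List.perm_append_singleton i _).symm
  · exact List.Pairwise.orderedInsert i _ (pvCands_pairwise a x)

-- main loop invariant: A's fold state is pvPair of the sorted candidates
theorem pvMain (x : Int) (a : List Int) :
    a.foldl (pvStep x) (1001, 1001) = pvPair (pvCands a x) := by
  induction a using List.reverseRecOn with
  | nil => simp [pvCands, PySem.List.sorted, pvPair, List.getD]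
  | append_singleton a i ih =>
    rw [List.foldl_append, ih]
    by_cases hx : x < i
    · by_cases h1 : i < 1001
      · rw [pvCands_append_singleton a x i hx h1, pvStep_orderedInsert x i _ hx h1 (pvCands_pairwise a x)]
        simp [List.foldl]
      · -- i > x but i ≥ 1001: step is a no-op and the filter drops i
        have hp := pvPair_le (pvCands a x) (pvCands_mem a x)
        have hfil : pvCands (a ++ [i]) x = pvCands a x := by
          simp [pvCands, List.filter_append, h1]
        rw [hfil]
        simp only [List.foldl, pvStep]
        rw [if_pos hx, if_neg (by omega), if_neg (by omega)]
    · have hfil : pvCands (a ++ [i]) x = pvCands a x := by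
        simp [pvCands, List.filter_append, hx]
      rw [hfil]
      simp [List.foldl, pvStep, hx]

-- ===== VERDICT (by name: the statement is the Claim_ definition above) =====
theorem terkecil_kedua_spec : Claim_equal_terkecil_kedua := by
  intro a x _
  unfold Spec_terkecil_kedua terkecil_kedua terkecil_kedua_alt
  show (List.foldl (pvStep x) (1001, 1001) a).2
      = (match PySem.List.pyGet? (pvCands a x) 1 with | some v => v | none => 1001)
  rw [pvMain]
  rcases pvCands a x with _ | ⟨b, _ | ⟨d, t⟩⟩ <;>
    simp [pvPair, PySem.List.pyGet?, PySem.List.pyIdx?, List.getD]
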